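-- pv_equiv track=rewrite | github.com/NCCMNT/Text-Algorithms | lab4/two_dimensional_search.py | find_pattern_2d
-- ===== SOURCE A (Python) =====
-- def find_pattern_in_column(text_column: str, pattern_columns: list[str]) -> list[tuple[int, int]]:
--     """
--     Wyszukuje wszystkie kolumny wzorca w kolumnie tekstu.
--
--     Args:
--         text_column: Kolumna tekstu
--         pattern_columns: Lista kolumn wzorca
--
--     Returns:
--         Lista krotek (pozycja, indeks kolumny), gdzie znaleziono kolumnę wzorca
--     """
--     # TODO: Zaimplementuj wyszukiwanie kolumn wzorca w kolumnie tekstu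
--     # TODO: Dla każdej kolumny wzorca, przeszukaj kolumnę tekstu
--     # TODO: Zwróć listę krotek (pozycja, indeks kolumny) dla znalezionych dopasowań
--     n = len(text_column)
--     if n == 0 or len(pattern_columns) == 0: return []
--     results = []
--
--     for j, pcol in enumerate(pattern_columns):
--         m = len(pcol)
--         if m > n: continue
--         for i in range(n - m + 1):
--             if pcol == text_column[i:i+m]:
--                 results.append((i, j))
--
--     return results
--
-- def find_pattern_2d(text: list[str], pattern: list[str]) -> list[tuple[int, int]]:
--     """
--     Wyszukuje wzorzec dwuwymiarowy w tekście dwuwymiarowym.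
--
--     Args:
--         text: Tekst dwuwymiarowy (lista ciągów znaków tej samej długości)
--         pattern: Wzorzec dwuwymiarowy (lista ciągów znaków tej samej długości)
--
--     Returns:
--         Lista krotek (i, j), gdzie (i, j) to współrzędne lewego górnego rogu wzorca w tekście
--     """
--     # TODO: Zaimplementuj wyszukiwanie wzorca dwuwymiarowego
--     # TODO: Obsłuż przypadki brzegowe (pusty tekst/wzorzec, wymiary)
--     # TODO: Sprawdź, czy wszystkie wiersze mają taką samą długość
--     # TODO: Zaimplementuj algorytm wyszukiwania dwuwymiarowego
--     # TODO: Zwróć listę współrzędnych lewego górnego rogu dopasowanego wzorca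
--     a, b = len(text), len(pattern)
--     if a == 0 or b == 0: return []
--
--     c, d = len(text[0]), len(pattern[0])
--     if d > c or b > a: return []
--
--     if any(len(line) != d for line in pattern) or any(len(line) != c for line in text): return []
--     results = []
--     pattern_cols = list(''.join(x) for x in zip(*pattern))
--     S = set()
--
--     for i in range(c):
--         text_col = ''.join([text[j][i] for j in range(a)])
--         found = find_pattern_in_column(text_col, pattern_cols)
--         for row, num in found:
--             S.add((row, i, num))
--
--     for i in range(a):
--         for j in range(c - d + 1):
--             flag = True
--             for m in range(d):
--                 if (i,j+m,m) not in S: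
--                     flag = False
--                     break
--             if flag:
--                 results.append((i,j))
--
--     return results
-- ===== SOURCE B (Python) =====
-- def find_pattern_2d(text: list[str], pattern: list[str]) -> list[tuple[int, int]]:
--     a, b = len(text), len(pattern)
--     if a == 0 or b == 0:
--         return []
--     c, d = len(text[0]), len(pattern[0])
--     if d > c or b > a:
--         return []
--     if any(len(row) != d for row in pattern) or any(len(row) != c for row in text):
--         return []
--     return [(i, j)
--             for i in range(a - b + 1)
--             for j in range(c - d + 1)
--             if all(text[i + k][j:j + d] == pattern[k] for k in range(b))]
-- ===== Notes on version B (the rewrite author's own statement) =====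
-- stated objective: simpler
-- what changed: A extracts every text column, searches each pattern column in it, stores hits in a set of (row,col,colindex) triples and then intersects d set-membership tests per anchor; B drops the column and set machinery entirely and checks each anchor directly by comparing the b row slices text[i+k][j:j+d] against the pattern rows (measured constant-factor speedup). Pre_ excludes only the degenerate zero-width patterns of height >= 2 that fit in a uniform text, where A reports anchors at every row i and B only where the pattern's height fits; neither is specified for an empty pattern.
-- outside the precondition, e.g. on find_pattern_2d(['', ''], ['', '']): A returns [(0, 0), (1, 0)], B returns [(0, 0)]
import Mathlib
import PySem

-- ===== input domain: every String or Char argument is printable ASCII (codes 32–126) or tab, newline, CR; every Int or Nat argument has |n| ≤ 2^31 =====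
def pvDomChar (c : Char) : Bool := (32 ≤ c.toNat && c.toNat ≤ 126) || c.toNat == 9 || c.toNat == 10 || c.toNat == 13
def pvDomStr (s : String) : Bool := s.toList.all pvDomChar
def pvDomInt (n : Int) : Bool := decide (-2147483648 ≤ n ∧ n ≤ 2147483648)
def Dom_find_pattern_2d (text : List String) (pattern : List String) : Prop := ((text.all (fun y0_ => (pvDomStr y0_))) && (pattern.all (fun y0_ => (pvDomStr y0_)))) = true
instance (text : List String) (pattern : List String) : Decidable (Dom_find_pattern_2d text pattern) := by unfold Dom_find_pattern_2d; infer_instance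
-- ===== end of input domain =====

-- B replaces A's column-search-plus-set-intersection machinery by a direct per-anchor comparison of row slices; return values agree on Pre_.

-- ===== PORT A =====
-- String values are handled as their character lists (Python string equality/slicing is exactly
-- character-sequence equality/slicing), so this helper takes List Char where the Python takes str.
def find_pattern_in_column (text_column : List Char) (pattern_columns : List (List Char)) : List (Int × Int) :=
  let n : Int := text_column.length
  if n = 0 ∨ pattern_columns.length = 0 then []
  else
    (PySem.List.enumerate pattern_columns 0).foldl
      (fun results jp =>
        let m : Int := jp.2.length
        if m > n then results
        else
          (PySem.List.pyRange 0 (n - m + 1) 1).foldl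
            (fun results i =>
              if jp.2 = PySem.List.slice text_column (some i) (some (i + m))
              then results ++ [(i, jp.1)] else results)
            results)
      []

def find_pattern_2d (text : List String) (pattern : List String) : List (Int × Int) :=
  let a : Int := text.length
  let b : Int := pattern.length
  if a = 0 ∨ b = 0 then []
  else
    let c : Int := PySem.Str.len (PySem.List.pyGetD text 0 "")
    let d : Int := PySem.Str.len (PySem.List.pyGetD pattern 0 "")
    if d > c ∨ b > a then []
    else if pattern.any (fun line => decide (PySem.Str.len line ≠ d)) || text.any (fun line => decide (PySem.Str.len line ≠ c)) then []
    else
      -- zip(*pattern): exact here because the guard above ensured every pattern row has length d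
      let pattern_cols : List (List Char) :=
        (PySem.List.pyRange 0 d 1).map (fun m => pattern.map (fun row => PySem.List.pyGetD row.toList m ' '))
      let S : PySem.Set (Int × Int × Int) :=
        (PySem.List.pyRange 0 c 1).foldl
          (fun S i =>
            let text_col : List Char :=
              (PySem.List.pyRange 0 a 1).map (fun j => PySem.List.pyGetD (PySem.List.pyGetD text j "").toList i ' ')
            let found := find_pattern_in_column text_col pattern_cols
            found.foldl (fun S rn => PySem.Set.add S (rn.1, i, rn.2)) S)
          PySem.Set.empty
      (PySem.List.pyRange 0 a 1).foldl
        (fun results i =>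
          (PySem.List.pyRange 0 (c - d + 1) 1).foldl
            (fun results j =>
              -- Python's flag/break loop over m: flag = every m < d has (i, j+m, m) ∈ S
              if (PySem.List.pyRange 0 d 1).all (fun m => decide ((i, j + m, m) ∈ S))
              then results ++ [(i, j)] else results)
            results)
        []

-- ===== PORT B =====
def find_pattern_2d_alt (text : List String) (pattern : List String) : List (Int × Int) :=
  let a : Int := text.length
  let b : Int := pattern.length
  if a = 0 ∨ b = 0 then []
  else
    let c : Int := PySem.Str.len (PySem.List.pyGetD text 0 "")
    let d : Int := PySem.Str.len (PySem.List.pyGetD pattern 0 "")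
    if d > c ∨ b > a then []
    else if pattern.any (fun line => decide (PySem.Str.len line ≠ d)) || text.any (fun line => decide (PySem.Str.len line ≠ c)) then []
    else
      (PySem.List.pyRange 0 (a - b + 1) 1).flatMap (fun i =>
        ((PySem.List.pyRange 0 (c - d + 1) 1).filter (fun j =>
          (PySem.List.pyRange 0 b 1).all (fun k =>
            decide (PySem.List.slice (PySem.List.pyGetD text (i + k) "").toList (some j) (some (j + d))
              = (PySem.List.pyGetD pattern k "").toList)))).map (fun j => (i, j)))

-- ===== PRECONDITION & SPEC =====
-- Pre_ excludes zero-width patterns of height ≥ 2 (every pattern row is "" and the pattern fits in a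
-- uniform text): on such degenerate empty patterns A's vacuous set test reports anchors (i, j) for every
-- row i, even where the pattern's height does not fit below, while B reports only anchors where it fits —
-- neither behaviour is specified for an empty pattern, so these inputs are left outside the claim.
def Pre_find_pattern_2d (text : List String) (pattern : List String) : Prop :=
  ¬(2 ≤ pattern.length ∧ (∀ r ∈ pattern, r.toList = []) ∧ pattern.length ≤ text.length ∧
    ∀ r ∈ text, r.toList.length = (text.headD "").toList.length)
instance (text : List String) (pattern : List String) : Decidable (Pre_find_pattern_2d text pattern) := by
  unfold Pre_find_pattern_2d; infer_instance
def pvWitness_find_pattern_2d : List String × List String := (["ab", "cd"], ["a", "c"])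

def Spec_find_pattern_2d (text : List String) (pattern : List String) (out : List (Int × Int)) : Prop := out = find_pattern_2d_alt text pattern
instance (text : List String) (pattern : List String) (out : List (Int × Int)) : Decidable (Spec_find_pattern_2d text pattern out) := by unfold Spec_find_pattern_2d; infer_instance

-- ===== CLAIM (what is proved, stated in full; the proofs are below) =====
def Claim_equal_find_pattern_2d : Prop := ∀ (text : List String) (pattern : List String), Dom_find_pattern_2d text pattern → Pre_find_pattern_2d text pattern → Spec_find_pattern_2d text pattern (find_pattern_2d text pattern)

-- ===== LEMMAS AND PROOFS =====

-- the text column at index x (also used for pattern columns)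
def pvCol (rows : List String) (x : Int) : List Char :=
  rows.map (fun row => PySem.List.pyGetD row.toList x ' ')

-- A's set S, with the column extraction folded into pvCol
def pvS (text pattern : List String) (c d : Int) : PySem.Set (Int × Int × Int) :=
  (PySem.List.pyRange 0 c 1).foldl
    (fun S x =>
      (find_pattern_in_column (pvCol text x) ((PySem.List.pyRange 0 d 1).map (fun m => pvCol pattern m))).foldl
        (fun S rn => PySem.Set.add S (rn.1, x, rn.2)) S)
    PySem.Set.empty

lemma mem_foldl_of_mem_step {α β : Type} (l : List β) (g : List α → β → List α) (Q : β → α → Prop)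
    (h : ∀ s x y, y ∈ g s x ↔ y ∈ s ∨ Q x y) (s0 : List α) (y : α) :
    y ∈ l.foldl g s0 ↔ y ∈ s0 ∨ ∃ x ∈ l, Q x y := by
  induction l generalizing s0 with
  | nil => simp
  | cons x xs ih => rw [List.foldl_cons, ih, h]; simp; tauto

lemma col_eq (text : List String) (x : Int) :
    (PySem.List.pyRange 0 (text.length : Int) 1).map
      (fun j => PySem.List.pyGetD (PySem.List.pyGetD text j "").toList x ' ') = pvCol text x := by
  rw [show (fun j => PySem.List.pyGetD (PySem.List.pyGetD text j "").toList x ' ')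
        = (fun row : String => PySem.List.pyGetD row.toList x ' ') ∘ (fun j => PySem.List.pyGetD text j "") from rfl,
      ← List.map_map, PySem.List.map_pyGetD_pyRange_zero']
  rfl

lemma fpic_eq (col : List Char) (cols : List (List Char)) :
    find_pattern_in_column col cols =
    if (col.length : Int) = 0 ∨ cols.length = 0 then []
    else
      (PySem.List.enumerate cols 0).flatMap (fun jp =>
        ((PySem.List.pyRange 0 ((col.length : Int) - (jp.2.length : Int) + 1) 1).filter
          (fun i => decide (jp.2 = PySem.List.slice col (some i) (some (i + (jp.2.length : Int)))))).map
          (fun i => (i, jp.1))) := by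
  by_cases h : (col.length : Int) = 0 ∨ cols.length = 0
  · simp only [find_pattern_in_column, if_pos h]
  · simp only [find_pattern_in_column, if_neg h]
    have hstep : (fun (results : List (Int × Int)) (jp : Int × List Char) =>
        if ((jp.2.length : Int) > (col.length : Int)) then results
        else List.foldl
          (fun results i => if jp.2 = PySem.List.slice col (some i) (some (i + (jp.2.length : Int)))
            then results ++ [(i, jp.1)] else results)
          results (PySem.List.pyRange 0 ((col.length : Int) - (jp.2.length : Int) + 1) 1))
      = fun results jp => results ++
          ((PySem.List.pyRange 0 ((col.length : Int) - (jp.2.length : Int) + 1) 1).filter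
            (fun i => decide (jp.2 = PySem.List.slice col (some i) (some (i + (jp.2.length : Int)))))).map
            (fun i => (i, jp.1)) := by
      funext results jp
      rw [PySem.List.foldl_append_ite]
      split_ifs with hgt
      · rw [PySem.List.pyRange_one_eq_nil (by omega)]; simp
      · rfl
    rw [hstep, PySem.List.foldl_append_eq_flatMap, List.nil_append]

lemma mem_fpic (col : List Char) (cols : List (List Char)) (hcol : col ≠ []) (r q : Int) :
    ((r, q) ∈ find_pattern_in_column col cols) ↔
      ∃ k : Nat, k < cols.length ∧ q = (k : Int) ∧
        ∃ i : Nat, r = (i : Int) ∧ i + (cols.getD k []).length ≤ col.length ∧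
          cols.getD k [] = (col.drop i).take (cols.getD k []).length := by
  by_cases hcols : cols.length = 0
  · rw [fpic_eq, if_pos (Or.inr hcols)]
    simp [hcols]
  · rw [fpic_eq, if_neg (by push Not; exact ⟨by simpa using hcol, hcols⟩)]
    simp only [List.mem_flatMap, PySem.List.mem_enumerate_iff, List.mem_map, List.mem_filter,
      PySem.List.mem_pyRange_one, decide_eq_true_eq]
    constructor
    · rintro ⟨jp, ⟨k, hk, rfl⟩, i, ⟨⟨hi0, hilt⟩, hslice⟩, heq⟩
      dsimp only at hilt hslice heq
      obtain ⟨rfl, rfl⟩ : i = r ∧ (0 : Int) + (k : Int) = q := by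
        simpa [Prod.ext_iff] using heq
      rw [← List.getD_eq_getElem cols [] hk] at hilt hslice
      refine ⟨k, hk, by omega, i.toNat, by omega, by omega, ?_⟩
      rw [show i = ((i.toNat : Nat) : Int) by omega, PySem.List.slice_natCast_add] at hslice
      exact hslice
    · rintro ⟨k, hk, rfl, i0, rfl, hle, hEq⟩
      refine ⟨(0 + (k : Int), cols.getD k []),
        ⟨k, hk, by rw [List.getD_eq_getElem cols [] hk]⟩, (i0 : Int),
        ⟨⟨by omega, by dsimp only; omega⟩,
         by dsimp only; rw [PySem.List.slice_natCast_add]; exact hEq⟩, by simp⟩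

lemma drop_take_eq_iff (ys zs : List Char) (j d : Nat) (h1 : j + d ≤ ys.length) (h2 : zs.length = d) :
    ((ys.drop j).take d = zs) ↔ ∀ m, m < d → ys.getD (j + m) ' ' = zs.getD m ' ' := by
  have hlen : ((ys.drop j).take d).length = d := by simp; omega
  constructor
  · intro h m hm
    have e : ((ys.drop j).take d)[m]'(by rw [hlen]; exact hm) = zs[m]'(by omega) := by
      simp only [h]
    rw [List.getElem_take, List.getElem_drop] at e
    rw [List.getD_eq_getElem ys ' ' (by omega), List.getD_eq_getElem zs ' ' (by omega)]
    exact e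
  · intro h
    apply List.ext_getElem (by omega)
    intro m h1 h2
    have hm : m < d := by rw [hlen] at h1; exact h1
    have e := h m hm
    rw [List.getD_eq_getElem ys ' ' (by omega), List.getD_eq_getElem zs ' ' (by omega)] at e
    simpa [List.getElem_take, List.getElem_drop] using e

lemma getD_pvCol (rows : List String) (x : Int) (k : Nat) (hk : k < rows.length) :
    (pvCol rows x).getD k ' ' = PySem.List.pyGetD (rows.getD k "").toList x ' ' := by
  unfold pvCol
  rw [List.getD_eq_getElem _ ' ' (by simpa using hk), List.getElem_map,
      ← List.getD_eq_getElem rows "" hk]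

lemma mem_pvS_iff (text pattern : List String) (c d : Int) (y : Int × Int × Int) :
    y ∈ pvS text pattern c d ↔
      ∃ x : Int, (0 ≤ x ∧ x < c) ∧
        ∃ rn ∈ find_pattern_in_column (pvCol text x)
            ((PySem.List.pyRange 0 d 1).map (fun m => pvCol pattern m)),
          y = (rn.1, x, rn.2) := by
  unfold pvS
  rw [mem_foldl_of_mem_step _ _
      (fun x y => ∃ rn ∈ find_pattern_in_column (pvCol text x)
          ((PySem.List.pyRange 0 d 1).map (fun m => pvCol pattern m)), y = (rn.1, x, rn.2))
      (fun s x y => PySem.Set.mem_foldl_add _ _ s y)]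
  simp [PySem.List.mem_pyRange_one, PySem.Set.empty]

-- the per-character matching condition both programs decide
def pvCW (text pattern : List String) (d' i j : Nat) : Prop :=
  ∀ k m : Nat, k < pattern.length → m < d' →
    (text.getD (i + k) "").toList.getD (j + m) ' ' = (pattern.getD k "").toList.getD m ' '

lemma memS_char_iff (text pattern : List String) (c' d' : Nat)
    (hna : 0 < text.length)
    (htext : ∀ row ∈ text, row.toList.length = c')
    (hpat : ∀ row ∈ pattern, row.toList.length = d')
    (i j m : Nat) (hjm : j + m < c') :
    (((i : Int), (j : Int) + (m : Int), (m : Int)) ∈ pvS text pattern (c' : Int) (d' : Int)) ↔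
      (m < d' ∧ i + pattern.length ≤ text.length ∧
        ∀ k, k < pattern.length →
          (text.getD (i + k) "").toList.getD (j + m) ' ' = (pattern.getD k "").toList.getD m ' ') := by
  have hcols_len : ((PySem.List.pyRange 0 (d' : Int) 1).map (fun m => pvCol pattern m)).length = d' := by
    simp [PySem.List.length_pyRange_one]
  have hgetDcols : ∀ m' : Nat, m' < d' →
      ((PySem.List.pyRange 0 (d' : Int) 1).map (fun m => pvCol pattern m)).getD m' [] = pvCol pattern (m' : Int) := by
    intro m' hm'
    rw [← PySem.List.pyGetD_natCast, PySem.List.pyGetD_map_pyRange _ d' m' _ hm']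
  have hcollen : ∀ x : Int, (pvCol text x).length = text.length := by intro x; simp [pvCol]
  have hpcollen : ∀ x : Int, (pvCol pattern x).length = pattern.length := by intro x; simp [pvCol]
  have htextne : text ≠ [] := List.ne_nil_of_length_pos hna
  have hcolne : ∀ x : Int, pvCol text x ≠ [] := by
    intro x; simpa [pvCol] using htextne
  have hcast : (j : Int) + (m : Int) = ((j + m : Nat) : Int) := by push_cast; ring
  rw [mem_pvS_iff]
  constructor
  · rintro ⟨x, ⟨hx0, hxc⟩, rn, hrn, heq⟩
    obtain ⟨e1, e2, e3⟩ : (i : Int) = rn.1 ∧ (j : Int) + (m : Int) = x ∧ (m : Int) = rn.2 := by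
      simpa [Prod.ext_iff] using heq
    rw [show rn = (rn.1, rn.2) from rfl] at hrn
    obtain ⟨kk, hkk, hq, i0, hr, hle, hEq⟩ := (mem_fpic _ _ (hcolne x) rn.1 rn.2).mp hrn
    rw [hcols_len] at hkk
    obtain rfl : m = kk := by omega
    obtain rfl : i = i0 := by omega
    rw [hgetDcols m hkk, hpcollen, hcollen] at hle
    refine ⟨hkk, hle, ?_⟩
    intro k' hk'
    rw [hgetDcols m hkk, hpcollen] at hEq
    have e := (drop_take_eq_iff (pvCol text x) (pvCol pattern (m : Int)) i pattern.length
        (by rw [hcollen]; exact hle) (hpcollen _)).mp hEq.symm k' hk'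
    rw [getD_pvCol text _ _ (by omega), getD_pvCol pattern _ _ hk', ← e2, hcast,
        PySem.List.pyGetD_natCast, PySem.List.pyGetD_natCast] at e
    exact e
  · rintro ⟨hmd, hle, hCW⟩
    refine ⟨(j : Int) + (m : Int), ⟨by omega, by omega⟩, ((i : Int), (m : Int)), ?_, rfl⟩
    apply (mem_fpic _ _ (hcolne _) _ _).mpr
    refine ⟨m, by rw [hcols_len]; exact hmd, rfl, i, rfl, ?_, ?_⟩
    · rw [hgetDcols m hmd, hpcollen, hcollen]; exact hle
    · rw [hgetDcols m hmd, hpcollen]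
      refine ((drop_take_eq_iff _ _ i pattern.length ?_ (hpcollen _)).mpr ?_).symm
      · rw [hcollen]; exact hle
      · intro k' hk'
        rw [getD_pvCol text _ _ (by omega), getD_pvCol pattern _ _ hk', hcast,
            PySem.List.pyGetD_natCast, PySem.List.pyGetD_natCast]
        exact hCW k' hk'

lemma slice_char_iff (text pattern : List String) (c' d' : Nat)
    (htext : ∀ row ∈ text, row.toList.length = c')
    (hpat : ∀ row ∈ pattern, row.toList.length = d')
    (i j k : Nat) (hik : i + k < text.length) (hk : k < pattern.length) (hj : j + d' ≤ c') :
    (PySem.List.slice (text.getD (i + k) "").toList (some (j : Int)) (some ((j : Int) + (d' : Int)))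
        = (pattern.getD k "").toList) ↔
      ∀ m, m < d' → (text.getD (i + k) "").toList.getD (j + m) ' ' = (pattern.getD k "").toList.getD m ' ' := by
  have hrow : (text.getD (i + k) "").toList.length = c' := by
    apply htext
    rw [List.getD_eq_getElem text "" hik]
    exact List.getElem_mem _
  have hprow : ((pattern.getD k "").toList).length = d' := by
    apply hpat
    rw [List.getD_eq_getElem pattern "" hk]
    exact List.getElem_mem _
  rw [PySem.List.slice_natCast_add]
  exact drop_take_eq_iff _ _ j d' (by omega) hprow

lemma find_pattern_2d_eq (text pattern : List String) :
    find_pattern_2d text pattern =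
    if ((text.length : Int) = 0 ∨ (pattern.length : Int) = 0) then []
    else if (PySem.Str.len (PySem.List.pyGetD pattern 0 "") > PySem.Str.len (PySem.List.pyGetD text 0 "")
            ∨ (pattern.length : Int) > (text.length : Int)) then []
    else if (pattern.any (fun line => decide (PySem.Str.len line ≠ PySem.Str.len (PySem.List.pyGetD pattern 0 "")))
            || text.any (fun line => decide (PySem.Str.len line ≠ PySem.Str.len (PySem.List.pyGetD text 0 "")))) then []
    else
      (PySem.List.pyRange 0 (text.length : Int) 1).flatMap (fun i =>
        ((PySem.List.pyRange 0 (PySem.Str.len (PySem.List.pyGetD text 0 "") - PySem.Str.len (PySem.List.pyGetD pattern 0 "") + 1) 1).filter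
          (fun j => (PySem.List.pyRange 0 (PySem.Str.len (PySem.List.pyGetD pattern 0 "")) 1).all
            (fun m => decide ((i, j + m, m) ∈
              pvS text pattern (PySem.Str.len (PySem.List.pyGetD text 0 "")) (PySem.Str.len (PySem.List.pyGetD pattern 0 "")))))).map
          (fun j => (i, j))) := by
  by_cases h1 : (text.length : Int) = 0 ∨ (pattern.length : Int) = 0
  · simp only [find_pattern_2d]
    rw [if_pos h1, if_pos h1]
  · simp only [find_pattern_2d]
    rw [if_neg h1, if_neg h1]
    by_cases h2 : (PySem.Str.len (PySem.List.pyGetD pattern 0 "") > PySem.Str.len (PySem.List.pyGetD text 0 "")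
        ∨ (pattern.length : Int) > (text.length : Int))
    · rw [if_pos h2, if_pos h2]
    · rw [if_neg h2, if_neg h2]
      by_cases h3 : (pattern.any (fun line => decide (PySem.Str.len line ≠ PySem.Str.len (PySem.List.pyGetD pattern 0 "")))
          || text.any (fun line => decide (PySem.Str.len line ≠ PySem.Str.len (PySem.List.pyGetD text 0 "")))) = true
      · rw [if_pos h3, if_pos h3]
      · rw [if_neg h3, if_neg h3]
        have hpc : (fun m => pattern.map (fun row => PySem.List.pyGetD row.toList m ' '))
            = (fun m => pvCol pattern m) := rfl
        simp only [col_eq, hpc, pvS, PySem.List.foldl_append_if,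
          PySem.List.foldl_append_eq_flatMap, List.nil_append]
        rfl

lemma main_case (text pattern : List String) (c' d' : Nat)
    (hna : 0 < text.length) (hnb : 0 < pattern.length)
    (hc : PySem.Str.len (PySem.List.pyGetD text 0 "") = (c' : Int))
    (hd : PySem.Str.len (PySem.List.pyGetD pattern 0 "") = (d' : Int))
    (hdc : d' ≤ c') (hba : pattern.length ≤ text.length)
    (hpat : ∀ row ∈ pattern, row.toList.length = d')
    (htext : ∀ row ∈ text, row.toList.length = c')
    (hpre : pattern.length = 1 ∨ d' ≠ 0) :
    find_pattern_2d text pattern = find_pattern_2d_alt text pattern := by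
  rw [find_pattern_2d_eq]
  simp only [find_pattern_2d_alt, hc, hd]
  have hg3 : (pattern.any (fun line => decide (PySem.Str.len line ≠ (d' : Int)))
      || text.any (fun line => decide (PySem.Str.len line ≠ (c' : Int)))) = false := by
    rw [Bool.or_eq_false_iff]
    constructor <;> rw [List.any_eq_false] <;> intro line hline
    · simp [PySem.Str.len_eq, hpat line hline]
    · simp [PySem.Str.len_eq, htext line hline]
  rw [if_neg (by omega : ¬((text.length : Int) = 0 ∨ (pattern.length : Int) = 0)),
      if_neg (by omega : ¬((d' : Int) > (c' : Int) ∨ (pattern.length : Int) > (text.length : Int))),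
      if_neg (by omega : ¬((text.length : Int) = 0 ∨ (pattern.length : Int) = 0)),
      if_neg (by omega : ¬((d' : Int) > (c' : Int) ∨ (pattern.length : Int) > (text.length : Int)))]
  simp only [hg3]
  rw [if_neg (by simp), if_neg (by simp)]
  rw [PySem.List.pyRange_one_append 0 ((text.length : Int) - (pattern.length : Int) + 1) (text.length : Int)
        (by omega) (by omega),
      List.flatMap_append]
  have h2 : (PySem.List.pyRange ((text.length : Int) - (pattern.length : Int) + 1) (text.length : Int) 1).flatMap
      (fun i => ((PySem.List.pyRange 0 ((c' : Int) - (d' : Int) + 1) 1).filter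
        (fun j => (PySem.List.pyRange 0 (d' : Int) 1).all
          (fun m => decide ((i, j + m, m) ∈ pvS text pattern (c' : Int) (d' : Int))))).map
        (fun j => (i, j))) = [] := by
    rcases hpre with h | h
    · rw [h]
      have hnil : PySem.List.pyRange ((text.length : Int) - ((1 : Nat) : Int) + 1) (text.length : Int) 1 = [] :=
        PySem.List.pyRange_one_eq_nil (by omega)
      rw [hnil, List.flatMap_nil]
    · rw [List.flatMap_eq_nil_iff]
      intro iI hiI
      rw [PySem.List.mem_pyRange_one] at hiI
      rw [List.map_eq_nil_iff, List.filter_eq_nil_iff]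
      intro jI hjI
      rw [PySem.List.mem_pyRange_one] at hjI
      simp only [List.all_eq_true, decide_eq_true_eq, not_forall]
      refine ⟨0, by rw [PySem.List.mem_pyRange_one]; omega, ?_⟩
      intro hmem
      rw [show iI = ((iI.toNat : Nat) : Int) by omega, show jI = ((jI.toNat : Nat) : Int) by omega,
          show (0 : Int) = ((0 : Nat) : Int) from rfl] at hmem
      have hS := (memS_char_iff text pattern c' d' hna htext hpat iI.toNat jI.toNat 0 (by omega)).mp hmem
      omega
  rw [h2, List.append_nil]
  apply List.flatMap_congr
  intro iI hiI
  rw [PySem.List.mem_pyRange_one] at hiI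
  apply congrArg
  apply List.filter_congr
  intro jI hjI
  rw [PySem.List.mem_pyRange_one] at hjI
  obtain ⟨i, rfl⟩ : ∃ i : Nat, iI = (i : Int) := ⟨iI.toNat, by omega⟩
  obtain ⟨j, rfl⟩ : ∃ j : Nat, jI = (j : Int) := ⟨jI.toNat, by omega⟩
  rw [Bool.eq_iff_iff]
  simp only [List.all_eq_true, decide_eq_true_eq]
  constructor
  · intro hA k hk
    rw [PySem.List.mem_pyRange_one] at hk
    obtain ⟨k', rfl⟩ : ∃ k' : Nat, k = (k' : Int) := ⟨k.toNat, by omega⟩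
    have hk' : k' < pattern.length := by omega
    rw [show (i : Int) + (k' : Int) = ((i + k' : Nat) : Int) by push_cast; ring,
        PySem.List.pyGetD_natCast, PySem.List.pyGetD_natCast]
    rw [slice_char_iff text pattern c' d' htext hpat i j k' (by omega) hk' (by omega)]
    intro m hm
    have hmem := hA (m : Int) (by rw [PySem.List.mem_pyRange_one]; omega)
    exact ((memS_char_iff text pattern c' d' hna htext hpat i j m (by omega)).mp hmem).2.2 k' hk'
  · intro hB mI hmI
    rw [PySem.List.mem_pyRange_one] at hmI
    obtain ⟨m, rfl⟩ : ∃ m : Nat, mI = (m : Int) := ⟨mI.toNat, by omega⟩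
    apply (memS_char_iff text pattern c' d' hna htext hpat i j m (by omega)).mpr
    refine ⟨by omega, by omega, ?_⟩
    intro k hk
    have hBk := hB (k : Int) (by rw [PySem.List.mem_pyRange_one]; omega)
    rw [show (i : Int) + (k : Int) = ((i + k : Nat) : Int) by push_cast; ring,
        PySem.List.pyGetD_natCast, PySem.List.pyGetD_natCast] at hBk
    exact (slice_char_iff text pattern c' d' htext hpat i j k (by omega) hk (by omega)).mp hBk m (by omega)

lemma guard_case (text pattern : List String)
    (h : ((text.length : Int) = 0 ∨ (pattern.length : Int) = 0)
       ∨ (PySem.Str.len (PySem.List.pyGetD pattern 0 "") > PySem.Str.len (PySem.List.pyGetD text 0 "")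
           ∨ (pattern.length : Int) > (text.length : Int))
       ∨ ((pattern.any (fun line => decide (PySem.Str.len line ≠ PySem.Str.len (PySem.List.pyGetD pattern 0 "")))
           || text.any (fun line => decide (PySem.Str.len line ≠ PySem.Str.len (PySem.List.pyGetD text 0 "")))) = true)) :
    find_pattern_2d text pattern = find_pattern_2d_alt text pattern := by
  simp only [find_pattern_2d, find_pattern_2d_alt]
  split_ifs <;> first | rfl | tauto

lemma getD_zero_eq_headD (pattern : List String) (hne : pattern ≠ []) :
    PySem.List.pyGetD pattern 0 "" = pattern.headD "" := by
  cases pattern with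
  | nil => exact absurd rfl hne
  | cons h t =>
    rw [show (0 : Int) = ((0 : Nat) : Int) from rfl, PySem.List.pyGetD_natCast]
    rfl

-- ===== VERDICT (by name: the statement is the Claim_ definition above) =====
theorem find_pattern_2d_spec : Claim_equal_find_pattern_2d := by
  intro text pattern _ hpre
  unfold Spec_find_pattern_2d
  by_cases h1 : ((text.length : Int) = 0 ∨ (pattern.length : Int) = 0)
  · exact guard_case text pattern (Or.inl h1)
  by_cases h2 : (PySem.Str.len (PySem.List.pyGetD pattern 0 "") > PySem.Str.len (PySem.List.pyGetD text 0 "")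
      ∨ (pattern.length : Int) > (text.length : Int))
  · exact guard_case text pattern (Or.inr (Or.inl h2))
  by_cases h3 : ((pattern.any (fun line => decide (PySem.Str.len line ≠ PySem.Str.len (PySem.List.pyGetD pattern 0 "")))
      || text.any (fun line => decide (PySem.Str.len line ≠ PySem.Str.len (PySem.List.pyGetD text 0 "")))) = true)
  · exact guard_case text pattern (Or.inr (Or.inr h3))
  rw [Bool.not_eq_true, Bool.or_eq_false_iff] at h3
  obtain ⟨h3p, h3t⟩ := h3
  rw [List.any_eq_false] at h3p h3t
  rw [PySem.Str.len_eq, PySem.Str.len_eq] at h2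
  apply main_case text pattern (PySem.List.pyGetD text 0 "").toList.length (PySem.List.pyGetD pattern 0 "").toList.length
  · omega
  · omega
  · exact PySem.Str.len_eq _
  · exact PySem.Str.len_eq _
  · omega
  · omega
  · intro row hrow
    have h' := h3p row hrow
    simp [PySem.Str.len_eq] at h'
    exact h'
  · intro row hrow
    have h' := h3t row hrow
    simp [PySem.Str.len_eq] at h'
    exact h'
  · unfold Pre_find_pattern_2d at hpre
    have htne : text ≠ [] := by
      intro h; rw [h] at h1; simp at h1
    by_cases hone : pattern.length = 1
    · exact Or.inl hone
    · right
      intro hd0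
      apply hpre
      refine ⟨by omega, ?_, by omega, ?_⟩
      · intro r hr
        have h' := h3p r hr
        simp only [decide_eq_true_eq, not_not, PySem.Str.len_eq, Nat.cast_inj] at h'
        rw [hd0] at h'
        exact List.length_eq_zero_iff.mp h'
      · intro r hr
        have h' := h3t r hr
        simp only [decide_eq_true_eq, not_not, PySem.Str.len_eq, Nat.cast_inj] at h'
        rw [h', getD_zero_eq_headD text htne]
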